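-- pv_equiv track=rewrite | github.com/Th3nn3ss/matrix-week-one | src/task3.py | dictComp
-- ===== SOURCE A (Python) =====
-- def dictComp(stop, step):
--     try:
--         type(stop), type(step) == int, int
--     except:
--         raise TypeError
--     answer = {}  # A dictionary to hold the Items
--     count = 0  # A count to calculate steps
--     dictionary_items_count = 1
--     for number in range(1, stop+1):
--
--         if count == 0:
--             # We need to add a new Item to the dictionary
--             answer["items-{}".format(dictionary_items_count)] = [number]
--             dictionary_items_count += 1
--             count = 1
--         else:
--             # Get the most recently inserted key and append the numbers to it
--             last_key = list(answer.keys())[-1]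
--             answer[last_key].append(number)
--             count += 1
--         if count == step:
--             # If the count is up to step. We reset count and check if the remainder of the range of numbers is enough to fill up another Item.
--             count = 0
--             if stop-number < step:
--                 # If not we break from the loop prematurely.
--                 break
--
--     return answer
-- ===== SOURCE B (Python) =====
-- def dictComp(stop, step):
--     # Closed form: bucket i (0-based) holds i*step+1 .. min((i+1)*step, stop).
--     # There are stop//step full buckets; if stop is positive but smaller than
--     # step, the numbers 1..stop form a single partial bucket.
--     m = stop // step
--     if m == 0 and stop > 0:
--         m = 1
--     return {
--         "items-{}".format(i + 1): list(range(i * step + 1, min((i + 1) * step, stop) + 1))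
--         for i in range(m)
--     }
-- ===== Notes on version B (the rewrite author's own statement) =====
-- stated objective: faster
-- what changed: A builds the buckets one number at a time, re-materialising list(answer.keys())[-1] on every iteration to find the current bucket; B computes the number of buckets by integer division and emits each bucket directly as a range in a single dict comprehension.
-- outside the precondition, e.g. on dictComp(5, 0): A returns {'items-1': [1, 2, 3, 4, 5]}, B raises ZeroDivisionError; on dictComp(5, -2): A returns {'items-1': [1, 2, 3, 4, 5]}, B returns {}
import Mathlib
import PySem

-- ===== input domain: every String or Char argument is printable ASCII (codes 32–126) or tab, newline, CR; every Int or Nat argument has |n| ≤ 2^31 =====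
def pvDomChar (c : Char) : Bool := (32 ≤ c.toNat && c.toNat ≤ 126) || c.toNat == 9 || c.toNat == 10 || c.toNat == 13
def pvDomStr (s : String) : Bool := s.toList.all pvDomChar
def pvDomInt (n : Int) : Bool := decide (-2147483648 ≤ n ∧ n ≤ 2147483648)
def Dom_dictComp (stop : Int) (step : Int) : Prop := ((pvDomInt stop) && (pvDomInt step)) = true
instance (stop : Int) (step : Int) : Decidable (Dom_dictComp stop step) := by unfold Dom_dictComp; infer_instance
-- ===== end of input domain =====

-- B replaces A's per-number loop (which re-materialises list(answer.keys())[-1] on every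
-- iteration) by a closed-form bucket count (stop // step) and one dict comprehension.

-- ===== PORT A =====
-- the for-loop of A, recursing on the remaining numbers; state = (answer, count, dictionary_items_count)
def dictCompLoopA (stop step : Int) : List Int → PySem.Dict String (List Int) → Int → Int → PySem.Dict String (List Int)
  | [], answer, _, _ => answer
  | number :: rest, answer, count, dic =>
    if count == 0 then
      -- answer["items-{}".format(dictionary_items_count)] = [number]; count = 1; dic += 1
      let answer' := answer.insert ("items-" ++ PySem.Int.toStr dic) [number]
      if (1 : Int) == step then
        if stop - number < step then answer'
        else dictCompLoopA stop step rest answer' 0 (dic + 1)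
      else dictCompLoopA stop step rest answer' 1 (dic + 1)
    else
      -- last_key = list(answer.keys())[-1]  (answer is nonempty here, so pyGet? is some; the "" default is unreachable)
      let lastKey := (PySem.List.pyGet? answer.keys (-1)).getD ""
      -- answer[last_key].append(number): last_key is present, so modify with default [] is exact
      let answer' := answer.modify lastKey [] (fun v => v ++ [number])
      if count + 1 == step then
        if stop - number < step then answer'
        else dictCompLoopA stop step rest answer' 0 dic
      else dictCompLoopA stop step rest answer' (count + 1) dic

def dictComp (stop : Int) (step : Int) : List (String × List Int) :=
  (dictCompLoopA stop step (PySem.List.pyRange 1 (stop + 1) 1) PySem.Dict.empty 0 1).items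

-- ===== PORT B =====
def dictComp_alt (stop : Int) (step : Int) : List (String × List Int) :=
  let m0 := PySem.Int.floordiv stop step
  let m := if m0 == 0 && decide (0 < stop) then (1 : Int) else m0
  ((PySem.List.pyRange 0 m 1).foldl
      (fun d i => d.insert ("items-" ++ PySem.Int.toStr (i + 1))
          (PySem.List.pyRange (i * step + 1) (min ((i + 1) * step) stop + 1) 1))
      PySem.Dict.empty).items

-- ===== PRECONDITION & SPEC =====
-- Pre_ excludes step ≤ 0, which is outside the natural domain of a bucket size: there A's
-- count never reaches step and it accidentally returns everything in one bucket, while B's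
-- floor division raises ZeroDivisionError at step = 0 (and returns {} for step < 0).
def Pre_dictComp (stop : Int) (step : Int) : Prop := 1 ≤ step
instance (stop : Int) (step : Int) : Decidable (Pre_dictComp stop step) := by unfold Pre_dictComp; infer_instance
def pvWitness_dictComp : Int × Int := (7, 3)
def Spec_dictComp (stop : Int) (step : Int) (out : List (String × List Int)) : Prop := out = dictComp_alt stop step
instance (stop : Int) (step : Int) (out : List (String × List Int)) : Decidable (Spec_dictComp stop step out) := by unfold Spec_dictComp; infer_instance

-- ===== CLAIM (what is proved, stated in full; the proofs are below) =====
def Claim_equal_dictComp : Prop := ∀ (stop : Int) (step : Int), Dom_dictComp stop step → Pre_dictComp stop step → Spec_dictComp stop step (dictComp stop step)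

-- ===== LEMMAS AND PROOFS =====

-- decimal digits of a natural number, the way Nat.toDigits produces them
def pvDigits (n : Nat) : List Char :=
  if h : n < 10 then [Nat.digitChar n]
  else pvDigits (n / 10) ++ [Nat.digitChar (n % 10)]
decreasing_by exact Nat.div_lt_self (by omega) (by omega)

theorem pvDigits_lt (n : Nat) (h : n < 10) : pvDigits n = [Nat.digitChar n] := by
  conv_lhs => rw [pvDigits]
  exact dif_pos h

theorem pvDigits_ge (n : Nat) (h : ¬ n < 10) :
    pvDigits n = pvDigits (n / 10) ++ [Nat.digitChar (n % 10)] := by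
  conv_lhs => rw [pvDigits]
  exact dif_neg h

theorem pvDigits_ne_nil (n : Nat) : pvDigits n ≠ [] := by
  by_cases h : n < 10
  · rw [pvDigits_lt n h]; simp
  · rw [pvDigits_ge n h]; simp

theorem toDigitsCore_eq (f : Nat) : ∀ (n : Nat) (acc : List Char), n < f →
    Nat.toDigitsCore 10 f n acc = pvDigits n ++ acc := by
  induction f with
  | zero => omega
  | succ f ih =>
    intro n acc hn
    rw [Nat.toDigitsCore]
    by_cases h : n / 10 = 0
    · have h10 : n < 10 := by omega
      have hmod : n % 10 = n := Nat.mod_eq_of_lt h10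
      simp [h, pvDigits_lt n h10, hmod]
    · have hge : 10 ≤ n := by
        by_contra hc; exact h (Nat.div_eq_of_lt (by omega))
      have hlt : n / 10 < f := by
        have := Nat.div_lt_self (by omega : 0 < n) (by omega : 1 < 10)
        omega
      simp only [h, if_false]
      rw [ih (n / 10) _ hlt, pvDigits_ge n (by omega)]
      simp

theorem toDigits_eq_pvDigits (n : Nat) : Nat.toDigits 10 n = pvDigits n := by
  rw [Nat.toDigits]
  rw [toDigitsCore_eq (n + 1) n [] (by omega)]
  simp

theorem digitChar_inj : ∀ m < 10, ∀ n < 10, Nat.digitChar m = Nat.digitChar n → m = n := by decide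

theorem pvDigits_inj : ∀ (n m : Nat), pvDigits n = pvDigits m → n = m := by
  intro n
  induction n using Nat.strong_induction_on with
  | _ n ih =>
    intro m h
    by_cases hn : n < 10 <;> by_cases hm : m < 10
    · rw [pvDigits_lt n hn, pvDigits_lt m hm] at h
      exact digitChar_inj n hn m hm (by simpa using h)
    · rw [pvDigits_lt n hn, pvDigits_ge m hm] at h
      have hlen := congrArg List.length h
      simp at hlen
      exact absurd hlen (pvDigits_ne_nil _)
    · rw [pvDigits_ge n hn, pvDigits_lt m hm] at h
      have hlen := congrArg List.length h
      simp at hlen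
      exact absurd hlen (pvDigits_ne_nil _)
    · rw [pvDigits_ge n hn, pvDigits_ge m hm] at h
      have h2 := List.append_inj' h (by simp)
      obtain ⟨h3, h4⟩ := h2
      have hd : n / 10 = m / 10 := ih (n / 10) (Nat.div_lt_self (by omega) (by omega)) _ h3
      have hr : n % 10 = m % 10 :=
        digitChar_inj _ (Nat.mod_lt _ (by omega)) _ (Nat.mod_lt _ (by omega)) (by simpa using h4)
      omega

theorem toStr_inj {i j : Int} (hi : 0 ≤ i) (hj : 0 ≤ j)
    (h : PySem.Int.toStr i = PySem.Int.toStr j) : i = j := by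
  have h' := congrArg String.toList h
  rw [PySem.Int.toList_toStr, PySem.Int.toList_toStr] at h'
  unfold PySem.Int.toChars at h'
  rw [if_neg (by omega), if_neg (by omega), toDigits_eq_pvDigits, toDigits_eq_pvDigits] at h'
  have := pvDigits_inj _ _ h'
  omega

def pvKey (i : Int) : String := "items-" ++ PySem.Int.toStr i

theorem pvKey_inj {i j : Int} (hi : 0 ≤ i) (hj : 0 ≤ j) (h : pvKey i = pvKey j) : i = j := by
  unfold pvKey at h
  have h' := congrArg String.toList h
  simp only [String.toList_append] at h'
  exact toStr_inj hi hj (by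
    have := List.append_cancel_left h'
    have h2 := congrArg String.ofList this
    simpa [String.ofList_toList] using h2)

def pvGroup (step : Int) (i : Nat) : List Int :=
  PySem.List.pyRange ((i : Int) * step + 1) (((i : Int) + 1) * step + 1) 1

def pvPrefix (step : Int) (g : Nat) : List (String × List Int) :=
  (List.range g).map (fun (i : Nat) => (pvKey ((i : Int) + 1), pvGroup step i))

theorem pvPrefix_succ (step : Int) (g : Nat) :
    pvPrefix step (g + 1) = pvPrefix step g ++ [(pvKey ((g : Int) + 1), pvGroup step g)] := by
  unfold pvPrefix; rw [List.range_succ, List.map_append]; simp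

theorem pvKey_not_mem_prefix (step : Int) (g : Nat) :
    pvKey ((g : Int) + 1) ∉ (pvPrefix step g).map Prod.fst := by
  unfold pvPrefix
  simp only [List.map_map, List.mem_map, Function.comp_def]
  rintro ⟨i, hi, h⟩
  have := pvKey_inj (by positivity) (by positivity) h
  simp at hi
  omega

-- list(answer.keys())[-1] on a nonempty dict is its last key
theorem pyGet_last {α : Type} (xs : List α) (x : α) :
    PySem.List.pyGet? (xs ++ [x]) (-1) = some x := by
  have hlen : (xs ++ [x]).length = xs.length + 1 := by simp
  simp only [PySem.List.pyGet?, PySem.List.pyIdx?, hlen]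
  rw [if_neg (by omega), if_pos (by push_cast; omega)]
  simp

-- d.getD k dflt on pre ++ [(k, v)] with k not a key of pre is v
theorem getD_append_fresh (pre : List (String × List Int)) (k : String) (v dflt : List Int)
    (hk : k ∉ pre.map Prod.fst) :
    (PySem.Dict.mk (pre ++ [(k, v)]) : PySem.Dict String (List Int)).getD k dflt = v := by
  induction pre with
  | nil => simp [PySem.Dict.getD, PySem.Dict.get?]
  | cons p rest ih =>
    simp only [List.map_cons, List.mem_cons] at hk
    push_neg at hk
    simp only [List.cons_append]
    have : (PySem.Dict.mk ((p :: (rest ++ [(k, v)]))) : PySem.Dict String (List Int)).get? k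
        = (PySem.Dict.mk (rest ++ [(k, v)]) : PySem.Dict String (List Int)).get? k := by
      rcases p with ⟨k', v'⟩
      rw [PySem.Dict.get?_mk_cons]
      simp [show k' ≠ k from fun h => hk.1 h.symm]
    simp only [PySem.Dict.getD, this]
    exact ih hk.2

-- inserting at the (fresh-in-pre) last key overwrites the last entry in place
theorem insert_append_fresh (pre : List (String × List Int)) (k : String) (v w : List Int)
    (hk : k ∉ pre.map Prod.fst) :
    (PySem.Dict.mk (pre ++ [(k, v)]) : PySem.Dict String (List Int)).insert k w
      = PySem.Dict.mk (pre ++ [(k, w)]) := by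
  have hc : (PySem.Dict.mk (pre ++ [(k, v)]) : PySem.Dict String (List Int)).contains k = true := by
    simp [PySem.Dict.contains]
  simp only [PySem.Dict.insert, hc, if_pos]
  congr 1
  rw [List.map_append]
  congr 1
  · conv_rhs => rw [show pre = List.map id pre by simp]
    apply List.map_congr_left
    intro p hp
    have : p.1 ≠ k := fun h => hk (h ▸ List.mem_map_of_mem hp)
    simp [this]
  · simp

theorem modify_append_fresh (pre : List (String × List Int)) (k : String) (v : List Int)
    (f : List Int → List Int) (hk : k ∉ pre.map Prod.fst) :
    (PySem.Dict.mk (pre ++ [(k, v)]) : PySem.Dict String (List Int)).modify k [] f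
      = PySem.Dict.mk (pre ++ [(k, f v)]) := by
  unfold PySem.Dict.modify
  rw [getD_append_fresh pre k v [] hk, insert_append_fresh pre k v (f v) hk]

-- keys of pre ++ [(k,v)]
theorem keys_append (pre : List (String × List Int)) (k : String) (v : List Int) :
    (PySem.Dict.mk (pre ++ [(k, v)]) : PySem.Dict String (List Int)).keys
      = pre.map Prod.fst ++ [k] := by
  simp [PySem.Dict.keys]

theorem fdiv_bounds (stop step : Int) (hstep : 1 ≤ step) :
    (PySem.Int.floordiv stop step) * step ≤ stop ∧ stop < (PySem.Int.floordiv stop step) * step + step := by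
  unfold PySem.Int.floordiv
  rw [Int.fdiv_eq_ediv]
  rw [if_pos (Or.inl (by omega : (0:ℤ) ≤ step))]
  have hm := Int.emod_nonneg stop (by omega : step ≠ 0)
  have hl := Int.emod_lt_of_pos stop (by omega : 0 < step)
  have he := Int.ediv_add_emod stop step
  constructor <;> nlinarith

-- one loop iteration with count = 0: a fresh key is appended
theorem loopA_cons_zero (stop step b dic : Int) (d : PySem.Dict String (List Int))
    (hb : b <= stop) (hfresh : d.contains ("items-" ++ PySem.Int.toStr dic) = false) :
    dictCompLoopA stop step (PySem.List.pyRange b (stop + 1) 1) d 0 dic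
      = if (1 : Int) = step then
          (if stop - b < step
           then PySem.Dict.mk (d.items ++ [("items-" ++ PySem.Int.toStr dic, [b])])
           else dictCompLoopA stop step (PySem.List.pyRange (b + 1) (stop + 1) 1)
                  (PySem.Dict.mk (d.items ++ [("items-" ++ PySem.Int.toStr dic, [b])])) 0 (dic + 1))
        else dictCompLoopA stop step (PySem.List.pyRange (b + 1) (stop + 1) 1)
               (PySem.Dict.mk (d.items ++ [("items-" ++ PySem.Int.toStr dic, [b])])) 1 (dic + 1) := by
  have hins : d.insert ("items-" ++ PySem.Int.toStr dic) [b]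
      = PySem.Dict.mk (d.items ++ [("items-" ++ PySem.Int.toStr dic, [b])]) :=
    PySem.Dict.ext (by rw [PySem.Dict.items_insert_of_not_contains _ _ hfresh])
  rw [PySem.List.pyRange_one_cons (by omega : b < stop + 1)]
  simp only [dictCompLoopA, hins, beq_iff_eq]
  simp

-- one loop iteration with count /= 0: the number is appended to the last bucket
theorem loopA_cons_ne (stop step b count dic : Int) (pre : List (String × List Int))
    (k : String) (v : List Int) (hk : k ∉ pre.map Prod.fst) (hb : b <= stop) (hc : count ≠ 0) :
    dictCompLoopA stop step (PySem.List.pyRange b (stop + 1) 1)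
        (PySem.Dict.mk (pre ++ [(k, v)])) count dic
      = if count + 1 = step then
          (if stop - b < step then PySem.Dict.mk (pre ++ [(k, v ++ [b])])
           else dictCompLoopA stop step (PySem.List.pyRange (b + 1) (stop + 1) 1)
                  (PySem.Dict.mk (pre ++ [(k, v ++ [b])])) 0 dic)
        else dictCompLoopA stop step (PySem.List.pyRange (b + 1) (stop + 1) 1)
               (PySem.Dict.mk (pre ++ [(k, v ++ [b])])) (count + 1) dic := by
  rw [PySem.List.pyRange_one_cons (by omega : b < stop + 1)]
  simp only [dictCompLoopA, keys_append, pyGet_last, Option.getD_some,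
    modify_append_fresh pre k v _ hk, beq_iff_eq]
  simp [hc]

theorem loopA_nil (stop step count dic : Int) (d : PySem.Dict String (List Int)) :
    dictCompLoopA stop step [] d count dic = d := rfl

-- the inner loop: finishing one full group (count ≥ 1, group a .. a+step-1, a+step-1 ≤ stop)
theorem A_inner (stop step a : Int) (pre : List (String × List Int)) (k : String) (dic : Int)
    (hk : k ∉ pre.map Prod.fst) (hstep : 1 ≤ step) (ha : a + step - 1 ≤ stop) :
    ∀ (j : Nat) (b : Int), b = a + step - 1 - (j : Int) → a < b →
    dictCompLoopA stop step (PySem.List.pyRange b (stop + 1) 1)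
        (PySem.Dict.mk (pre ++ [(k, PySem.List.pyRange a b 1)])) (b - a) dic
      = if stop - (a + step - 1) < step
        then PySem.Dict.mk (pre ++ [(k, PySem.List.pyRange a (a + step) 1)])
        else dictCompLoopA stop step (PySem.List.pyRange (a + step) (stop + 1) 1)
              (PySem.Dict.mk (pre ++ [(k, PySem.List.pyRange a (a + step) 1)])) 0 dic := by
  intro j
  induction j with
  | zero =>
    intro b hb hab
    have hb' : b = a + step - 1 := by push_cast at hb; omega
    rw [loopA_cons_ne stop step b (b - a) dic pre k _ hk (by omega) (by omega)]
    rw [if_pos (by omega : b - a + 1 = step)]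
    rw [← PySem.List.pyRange_one_succ_right (by omega : a ≤ b)]
    have h1 : b + 1 = a + step := by omega
    have h2 : stop - b < step ↔ stop - (a + step - 1) < step := by omega
    by_cases hbr : stop - (a + step - 1) < step
    · rw [if_pos (h2.mpr hbr), if_pos hbr, h1]
    · rw [if_neg (fun hx => hbr (h2.mp hx)), if_neg hbr, h1]
  | succ j ih =>
    intro b hb hab
    have hblt : b < a + step - 1 := by push_cast at hb; omega
    rw [loopA_cons_ne stop step b (b - a) dic pre k _ hk (by omega) (by omega)]
    rw [if_neg (by omega : ¬ b - a + 1 = step)]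
    rw [← PySem.List.pyRange_one_succ_right (by omega : a ≤ b)]
    have hrec := ih (b + 1) (by push_cast at hb ⊢; omega) (by omega)
    rw [show b - a + 1 = b + 1 - a by ring]
    exact hrec


-- the tail case: the current group can never be completed before stop (stop - a < step)
theorem A_tail (stop step a : Int) (pre : List (String × List Int)) (k : String) (dic : Int)
    (hk : k ∉ pre.map Prod.fst) (hstep : 1 ≤ step) (h : stop - a < step) :
    ∀ (j : Nat) (b : Int), b = stop + 1 - (j : Int) → a < b → b ≤ stop + 1 →
    dictCompLoopA stop step (PySem.List.pyRange b (stop + 1) 1)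
        (PySem.Dict.mk (pre ++ [(k, PySem.List.pyRange a b 1)])) (b - a) dic
      = PySem.Dict.mk (pre ++ [(k, PySem.List.pyRange a (stop + 1) 1)]) := by
  intro j
  induction j with
  | zero =>
    intro b hb hab hble
    have hb' : b = stop + 1 := by push_cast at hb; omega
    rw [hb', PySem.List.pyRange_one_eq_nil (by omega : stop + 1 ≤ stop + 1), loopA_nil]
  | succ j ih =>
    intro b hb hab hble
    have hbs : b ≤ stop := by push_cast at hb; omega
    rw [loopA_cons_ne stop step b (b - a) dic pre k _ hk hbs (by omega)]
    rw [← PySem.List.pyRange_one_succ_right (by omega : a ≤ b)]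
    by_cases hcs : b - a + 1 = step
    · -- the group completes exactly at stop: the loop breaks, returning the same dict
      have hbstop : b = stop := by omega
      rw [if_pos hcs, if_pos (by omega : stop - b < step), hbstop]
    · rw [if_neg hcs]
      have hrec := ih (b + 1) (by push_cast at hb ⊢; omega) (by omega) (by omega)
      rw [show b - a + 1 = b + 1 - a by ring]
      exact hrec


-- one full group, starting with count = 0
theorem A_group (stop step : Int) (hstep : 1 ≤ step) (g : Nat)
    (hg : ((g : Int) + 1) * step ≤ stop) :
    dictCompLoopA stop step (PySem.List.pyRange ((g : Int) * step + 1) (stop + 1) 1)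
        (PySem.Dict.mk (pvPrefix step g)) 0 ((g : Int) + 1)
      = if stop - ((g : Int) + 1) * step < step
        then PySem.Dict.mk (pvPrefix step (g + 1))
        else dictCompLoopA stop step (PySem.List.pyRange (((g : Int) + 1) * step + 1) (stop + 1) 1)
              (PySem.Dict.mk (pvPrefix step (g + 1))) 0 ((g : Int) + 2) := by
  have hstep0 : 0 ≤ step := by omega
  have hgs : 0 ≤ (g : Int) * step := by positivity
  have ha : (g : Int) * step + 1 ≤ stop := by nlinarith
  have hfresh : (PySem.Dict.mk (pvPrefix step g) : PySem.Dict String (List Int)).contains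
      ("items-" ++ PySem.Int.toStr ((g : Int) + 1)) = false := by
    rw [PySem.Dict.contains_eq_decide_mem_keys, PySem.Dict.keys_mk]
    have hnm := pvKey_not_mem_prefix step g
    simp only [pvKey] at hnm
    simpa using hnm
  rw [loopA_cons_zero stop step ((g : Int) * step + 1) ((g : Int) + 1) _ ha hfresh]
  have hitems : (PySem.Dict.mk (pvPrefix step g) : PySem.Dict String (List Int)).items
      = pvPrefix step g := rfl
  rw [hitems]
  rw [show (g : Int) + 1 + 1 = (g : Int) + 2 by ring]
  by_cases h1 : (1 : Int) = step
  · -- step = 1: the group is the single number g*step+1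
    rw [if_pos h1]
    have hgrp : [((g : Int) * step + 1)] = pvGroup step g := by
      unfold pvGroup
      rw [show ((g : Int) + 1) * step + 1 = (g : Int) * step + 1 + 1 by rw [← h1]; ring]
      rw [PySem.List.pyRange_one_singleton]
    have hpk : ("items-" ++ PySem.Int.toStr ((g : Int) + 1)) = pvKey ((g : Int) + 1) := rfl
    rw [hpk, hgrp, ← pvPrefix_succ step g]
    have hcond : stop - ((g : Int) * step + 1) < step ↔ stop - ((g : Int) + 1) * step < step := by
      rw [← h1]; constructor <;> intro <;> omega
    by_cases hbr : stop - ((g : Int) + 1) * step < step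
    · rw [if_pos (hcond.mpr hbr), if_pos hbr]
    · rw [if_neg (fun hx => hbr (hcond.mp hx)), if_neg hbr]
      rw [show (g : Int) * step + 1 + 1 = ((g : Int) + 1) * step + 1 by rw [← h1]; ring]
  · rw [if_neg h1]
    have hstep2 : 2 ≤ step := by
      rcases lt_or_gt_of_ne h1 with h | h <;> omega
    have hone : [((g : Int) * step + 1)]
        = PySem.List.pyRange ((g : Int) * step + 1) ((g : Int) * step + 1 + 1) 1 := by
      rw [PySem.List.pyRange_one_singleton]
    rw [hone]
    have hinner := A_inner stop step ((g : Int) * step + 1) (pvPrefix step g)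
      ("items-" ++ PySem.Int.toStr ((g : Int) + 1)) ((g : Int) + 2)
      (by have hnm := pvKey_not_mem_prefix step g; simpa [pvKey] using hnm) hstep
      (by nlinarith) ((step - 2).toNat) ((g : Int) * step + 1 + 1)
      (by push_cast; omega) (by omega)
    rw [show (g : Int) * step + 1 + 1 - ((g : Int) * step + 1) = 1 by ring] at hinner
    rw [hinner]
    have hgrp2 : PySem.List.pyRange ((g : Int) * step + 1) ((g : Int) * step + 1 + step) 1
        = pvGroup step g := by
      unfold pvGroup
      rw [show ((g : Int) + 1) * step + 1 = (g : Int) * step + 1 + step by ring]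
    have hpre : (PySem.Dict.mk (pvPrefix step g ++
        [("items-" ++ PySem.Int.toStr ((g : Int) + 1),
          PySem.List.pyRange ((g : Int) * step + 1) ((g : Int) * step + 1 + step) 1)])
        : PySem.Dict String (List Int))
        = PySem.Dict.mk (pvPrefix step (g + 1)) := by
      rw [hgrp2, pvPrefix_succ step g]
      rfl
    rw [show (g : Int) * step + 1 + step - 1 = ((g : Int) + 1) * step by ring, hpre,
      show (g : Int) * step + 1 + step = ((g : Int) + 1) * step + 1 by ring]


-- chaining full groups down to the final bucket list
theorem A_outer (stop step : Int) (hstep : 1 ≤ step) :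
    ∀ (t g : Nat), (g : Int) + (t : Int) + 1 = PySem.Int.floordiv stop step →
    dictCompLoopA stop step (PySem.List.pyRange ((g : Int) * step + 1) (stop + 1) 1)
        (PySem.Dict.mk (pvPrefix step g)) 0 ((g : Int) + 1)
      = PySem.Dict.mk (pvPrefix step (g + t + 1)) := by
  have hbd := fdiv_bounds stop step hstep
  intro t
  induction t with
  | zero =>
    intro g hq
    push_cast at hq
    have hg : ((g : Int) + 1) * step ≤ stop := by nlinarith [hbd.1]
    rw [A_group stop step hstep g hg]
    rw [if_pos (by nlinarith [hbd.2])]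
  | succ t ih =>
    intro g hq
    push_cast at hq
    have hg : ((g : Int) + 1) * step ≤ stop := by nlinarith [hbd.1]
    rw [A_group stop step hstep g hg]
    rw [if_neg (by nlinarith [hbd.1])]
    have hrec := ih (g + 1) (by push_cast; omega)
    push_cast at hrec
    rw [show (g : Int) + 1 + 1 = (g : Int) + 2 by ring] at hrec
    rw [show g + (t + 1) + 1 = g + 1 + t + 1 by omega]
    exact hrec


-- B on stop ≤ 0: no buckets
theorem B_empty (stop step : Int) (hstep : 1 ≤ step) (hstop : stop ≤ 0) :
    dictComp_alt stop step = [] := by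
  have hbd := fdiv_bounds stop step hstep
  have hq0 : PySem.Int.floordiv stop step ≤ 0 := by nlinarith [hbd.1, hbd.2]
  unfold dictComp_alt
  have hc : ((PySem.Int.floordiv stop step == 0) && decide (0 < stop)) = false := by
    simp only [decide_eq_false_iff_not.mpr (show ¬ (0:Int) < stop by omega), Bool.and_false]
  simp only [hc, Bool.false_eq_true, if_false]
  rw [PySem.List.pyRange_one_eq_nil hq0]
  rfl

-- B on 0 < stop < step: one partial bucket
theorem B_partial (stop step : Int) (hstep : 1 ≤ step) (h1 : 0 < stop) (h2 : stop < step) :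
    dictComp_alt stop step = [(pvKey 1, PySem.List.pyRange 1 (stop + 1) 1)] := by
  have hbd := fdiv_bounds stop step hstep
  have hq0 : PySem.Int.floordiv stop step = 0 := by nlinarith [hbd.1, hbd.2]
  unfold dictComp_alt
  rw [hq0]
  have hc : (((0 : Int) == 0) && decide (0 < stop)) = true := by
    simp only [beq_self_eq_true, Bool.true_and, decide_eq_true_eq]
    omega
  simp only [hc, if_true]
  rw [show PySem.List.pyRange 0 1 1 = [(0 : Int)] from by decide]
  simp only [List.foldl_cons, List.foldl_nil]
  have hins : (PySem.Dict.empty.insert ("items-" ++ PySem.Int.toStr ((0 : Int) + 1))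
        (PySem.List.pyRange ((0 : Int) * step + 1) (min (((0 : Int) + 1) * step) stop + 1) 1)
        : PySem.Dict String (List Int)).items
      = [("items-" ++ PySem.Int.toStr ((0 : Int) + 1),
          PySem.List.pyRange ((0 : Int) * step + 1) (min (((0 : Int) + 1) * step) stop + 1) 1)] :=
    PySem.Dict.items_insert_of_not_contains _ _ (PySem.Dict.contains_empty _)
  rw [hins]
  rw [show ((0 : Int) + 1) = 1 by norm_num, show ((0 : Int) * step + 1) = 1 by ring,
    show ((1 : Int) * step) = step by ring,
    show min step stop = stop by rw [min_eq_right]; omega]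
  rfl

-- B on step ≤ stop: exactly ⌊stop/step⌋ full buckets
theorem B_full (stop step : Int) (hstep : 1 ≤ step)
    (hq1 : 1 ≤ PySem.Int.floordiv stop step) :
    dictComp_alt stop step = pvPrefix step (PySem.Int.floordiv stop step).toNat := by
  have hbd := fdiv_bounds stop step hstep
  unfold dictComp_alt
  have hc : ((PySem.Int.floordiv stop step == 0) && decide (0 < stop)) = false := by
    simp only [Bool.and_eq_false_iff, beq_eq_false_iff_ne]
    left
    omega
  simp only [hc, Bool.false_eq_true, if_false]
  rw [PySem.Dict.items_foldl_insert_fresh _ _ _ _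
    (fun a _ => PySem.Dict.contains_empty _)
    (by
      apply List.Nodup.map_on _ (PySem.List.nodup_pyRange_one 0 (PySem.Int.floordiv stop step))
      intro x hx y hy hxy
      rw [PySem.List.mem_pyRange_one] at hx hy
      have := pvKey_inj (i := x + 1) (j := y + 1) (by omega) (by omega) hxy
      omega)]
  rw [show PySem.Int.floordiv stop step = (((PySem.Int.floordiv stop step).toNat : Nat) : Int)
      by omega]
  rw [PySem.List.pyRange_zero_nat, List.map_map]
  unfold pvPrefix
  rw [show (PySem.Dict.empty : PySem.Dict String (List Int)).items = [] from rfl, List.nil_append]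
  apply List.map_congr_left
  intro i hi
  rw [List.mem_range] at hi
  have hle : ((i : Int) + 1) * step ≤ stop := by
    have h1 : (i : Int) + 1 ≤ PySem.Int.floordiv stop step := by omega
    nlinarith [hbd.1]
  simp only [Function.comp_apply]
  unfold pvGroup pvKey
  rw [show min (((i : Int) + 1) * step) stop = ((i : Int) + 1) * step by rw [min_eq_left]; omega]

-- ===== VERDICT (by name: the statement is the Claim_ definition above) =====
theorem dictComp_spec : Claim_equal_dictComp := by
  intro stop step hdom hpre
  have hstep : 1 ≤ step := hpre
  unfold Spec_dictComp
  have hbd := fdiv_bounds stop step hstep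
  by_cases hstop : stop ≤ 0
  · unfold dictComp
    rw [PySem.List.pyRange_one_eq_nil (by omega : stop + 1 ≤ 1), loopA_nil,
      B_empty stop step hstep hstop]
    rfl
  · push_neg at hstop
    by_cases hlt : stop < step
    · -- 0 < stop < step: A keeps a single partial bucket, and so does B
      unfold dictComp
      rw [loopA_cons_zero stop step 1 1 PySem.Dict.empty (by omega)
        (PySem.Dict.contains_empty _)]
      rw [if_neg (by omega : ¬ (1 : Int) = step)]
      have htail := A_tail stop step 1 [] ("items-" ++ PySem.Int.toStr 1) 2 (by simp) hstep
        (by omega) ((stop - 1).toNat) 2 (by push_cast; omega) (by omega) (by omega)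
      simp only [List.nil_append, show (2 : Int) - 1 = 1 from by norm_num] at htail
      rw [show (PySem.Dict.empty : PySem.Dict String (List Int)).items = [] from rfl]
      simp only [List.nil_append]
      norm_num
      rw [show [(1 : Int)] = PySem.List.pyRange 1 2 1 from by decide]
      rw [htail, B_partial stop step hstep hstop hlt]
      rfl
    · -- step ≤ stop: both produce the ⌊stop/step⌋ full buckets
      push_neg at hlt
      have hq1 : 1 ≤ PySem.Int.floordiv stop step := by nlinarith [hbd.2]
      unfold dictComp
      have houter := A_outer stop step hstep ((PySem.Int.floordiv stop step).toNat - 1) 0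
        (by push_cast; omega)
      norm_num at houter
      have hp0 : pvPrefix step 0 = [] := by unfold pvPrefix; simp
      rw [show (PySem.Dict.empty : PySem.Dict String (List Int)) = PySem.Dict.mk (pvPrefix step 0)
        from by rw [hp0]; rfl]
      rw [houter, B_full stop step hstep hq1]
      show pvPrefix step _ = pvPrefix step _
      congr 1
      omega
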